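-- pv_equiv track=rewrite | github.com/dmytro72/6.009 | labs/lab2/lab.py | get_actors_with_bacon_number
-- ===== SOURCE A (Python) =====
-- BACON_NUMBER = 4724
--
-- def get_actor_graph(data):
--     """Create a graph of actors by acting together"""
--     actor_graph = {}
--     for id1, id2, _ in data:
--         actor_graph.setdefault(id1, set()).add(id2)
--         actor_graph.setdefault(id2, set()).add(id1)
--     return actor_graph
--
-- def get_actors_with_bacon_number(data, n):
--     """Return a set of actors with Bacon Number of n"""
--     result = {BACON_NUMBER}
--     closed = set()
--     graph = get_actor_graph(data)
--     for _ in range(n):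
--         closed |= result
--         for i in result.copy():
--             result |= graph[i]
--         result -= closed
--         if not result:
--             break
--     return result
-- ===== SOURCE B (Python) =====
-- BACON_NUMBER = 4724
--
-- def get_actors_with_bacon_number(data, n):
--     """Return a set of actors with Bacon Number of n.
--
--     Builds no actor graph at all: a frontier expansion that rediscovers each
--     frontier actor's co-stars by scanning the raw edge list (A precomputes an
--     adjacency dict and expands whole layers with set union/subtraction)."""
--     def costars(u):
--         out = []
--         for a, b, _ in data:
--             if a == u and b not in out:
--                 out.append(b)
--             elif b == u and a not in out:
--                 out.append(a)
--         return out
--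
--     frontier = [BACON_NUMBER]
--     seen = set()
--     k = n
--     while k > 0 and frontier:
--         seen |= set(frontier)
--         nxt = []
--         for u in frontier:
--             for v in costars(u):
--                 if v not in seen and v not in nxt:
--                     nxt.append(v)
--         frontier = nxt
--         k -= 1
--     return set(frontier)
-- ===== Notes on version B (the rewrite author's own statement) =====
-- stated objective: alternative
-- what changed: A precomputes an adjacency dict of the whole cast and expands layers with set union/subtraction over that index; B builds no graph at all — it expands the frontier by rescanning the raw edge list to rediscover each frontier actor's co-stars, so the adjacency index disappears and the traversal works directly on the input edges.
import Mathlib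
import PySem

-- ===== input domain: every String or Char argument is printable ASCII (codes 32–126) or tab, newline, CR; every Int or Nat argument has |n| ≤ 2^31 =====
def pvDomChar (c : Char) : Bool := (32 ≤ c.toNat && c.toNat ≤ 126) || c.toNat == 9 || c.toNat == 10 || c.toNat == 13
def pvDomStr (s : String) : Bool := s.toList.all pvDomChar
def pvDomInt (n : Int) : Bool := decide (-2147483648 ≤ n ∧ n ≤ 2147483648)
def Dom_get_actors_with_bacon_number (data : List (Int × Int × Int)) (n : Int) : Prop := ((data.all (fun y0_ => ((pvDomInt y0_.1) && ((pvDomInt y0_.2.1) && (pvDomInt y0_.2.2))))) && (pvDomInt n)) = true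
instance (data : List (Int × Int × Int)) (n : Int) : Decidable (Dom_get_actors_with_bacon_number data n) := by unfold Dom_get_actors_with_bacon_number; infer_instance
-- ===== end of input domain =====

-- B builds no actor graph at all: instead of A's precomputed adjacency dict and whole-layer set
-- union/subtraction, B expands the frontier by rescanning the raw edge list for each frontier
-- actor's co-stars (alternative decomposition; it trades A's index for repeated edge scans).


-- ===== PORT A =====

-- helper: `get_actor_graph` — `setdefault(k, set()).add(v)` is `modify k ∅ (add · v)`
def get_actor_graph (data : List (Int × Int × Int)) : PySem.Dict Int (PySem.Set Int) :=
  data.foldl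
    (fun g t =>
      ((g.modify t.1 PySem.Set.empty (fun s => PySem.Set.add s t.2.1)).modify
        t.2.1 PySem.Set.empty (fun s => PySem.Set.add s t.1)))
    PySem.Dict.empty

-- A's `for _ in range(n)` loop body; `graph[i]` is read with default ∅, which is exact on
-- Pre_ (there Python's lookup never hits a missing key).
def baconLoop (graph : PySem.Dict Int (PySem.Set Int)) :
    Nat → PySem.Set Int → PySem.Set Int → PySem.Set Int
  | 0, result, _ => result
  | k + 1, result, closed =>
    let closed' := PySem.Set.union closed result
    let result' := result.foldl
      (fun r i => PySem.Set.union r (graph.getD i PySem.Set.empty)) result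
    let result'' := PySem.Set.diff result' closed'
    if result''.isEmpty then result'' else baconLoop graph k result'' closed'

def get_actors_with_bacon_number (data : List (Int × Int × Int)) (n : Int) : List Int :=
  let graph := get_actor_graph data
  baconLoop graph n.toNat (PySem.Set.ofList [(4724 : Int)]) PySem.Set.empty

-- ===== PORT B =====

-- B's helper `costars(u)`: one scan of the raw edge list, first occurrences only
def costars (data : List (Int × Int × Int)) (u : Int) : List Int :=
  data.foldl
    (fun out t =>
      if t.1 == u && !(out.contains t.2.1) then out ++ [t.2.1]
      else if t.2.1 == u && !(out.contains t.1) then out ++ [t.1]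
      else out)
    []

-- B's `while k > 0 and frontier` loop, counting `k = n` down (k.toNat iterations remain)
def expandLoop (data : List (Int × Int × Int)) :
    Nat → List Int → PySem.Set Int → List Int
  | 0, frontier, _ => PySem.Set.ofList frontier
  | k + 1, frontier, seen =>
    if frontier.isEmpty then PySem.Set.ofList frontier
    else
      let seen' := PySem.Set.union seen (PySem.Set.ofList frontier)
      let nxt := frontier.foldl
        (fun nxt u =>
          (costars data u).foldl
            (fun nxt v =>
              if !(PySem.Set.contains seen' v) && !(nxt.contains v) then nxt ++ [v] else nxt)
            nxt)
        []
      expandLoop data k nxt seen'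

def get_actors_with_bacon_number_alt (data : List (Int × Int × Int)) (n : Int) : List Int :=
  expandLoop data n.toNat [(4724 : Int)] PySem.Set.empty

-- ===== PRECONDITION & SPEC =====

def pvNodes (data : List (Int × Int × Int)) : List Int :=
  data.flatMap (fun t => [t.1, t.2.1])

-- A raises KeyError iff n >= 1 and BACON_NUMBER (4724) never occurs as an actor in data.
def Pre_get_actors_with_bacon_number (data : List (Int × Int × Int)) (n : Int) : Prop :=
  1 ≤ n → (4724 : Int) ∈ pvNodes data

instance (data : List (Int × Int × Int)) (n : Int) :
    Decidable (Pre_get_actors_with_bacon_number data n) := by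
  unfold Pre_get_actors_with_bacon_number; infer_instance

def pvWitness_get_actors_with_bacon_number : (List (Int × Int × Int)) × Int :=
  ([(4724, 1, 10), (1, 2, 11)], 2)

def Spec_get_actors_with_bacon_number (data : List (Int × Int × Int)) (n : Int)
    (out : List Int) : Prop :=
  out = get_actors_with_bacon_number_alt data n

instance (data : List (Int × Int × Int)) (n : Int) (out : List Int) :
    Decidable (Spec_get_actors_with_bacon_number data n out) := by
  unfold Spec_get_actors_with_bacon_number; infer_instance

-- ===== CLAIM =====

def Claim_equal_get_actors_with_bacon_number : Prop :=
  ∀ (data : List (Int × Int × Int)) (n : Int), Dom_get_actors_with_bacon_number data n →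
    Pre_get_actors_with_bacon_number data n →
    Spec_get_actors_with_bacon_number data n (get_actors_with_bacon_number data n)

-- ===== LEMMAS AND PROOFS =====

-- B's edge scan for u computes exactly A's adjacency entry for u
lemma costars_step (u : Int) (t : Int × Int × Int) (g : PySem.Dict Int (PySem.Set Int))
    (out : List Int) (h : out = g.getD u PySem.Set.empty) :
    (if t.1 == u && !(out.contains t.2.1) then out ++ [t.2.1]
     else if t.2.1 == u && !(out.contains t.1) then out ++ [t.1]
     else out)
    = ((g.modify t.1 PySem.Set.empty (fun s => PySem.Set.add s t.2.1)).modify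
        t.2.1 PySem.Set.empty (fun s => PySem.Set.add s t.1)).getD u PySem.Set.empty := by
  rw [PySem.Dict.getD_modify, PySem.Dict.getD_modify, PySem.Dict.getD_modify]
  by_cases h2 : u = t.2.1
  · rw [if_pos h2]
    by_cases h1 : u = t.1
    · rw [if_pos (show t.2.1 = t.1 by rw [← h2, ← h1]), ← h1, ← h2, ← h]
      by_cases hm : u ∈ out
      · rw [PySem.Set.add_of_mem hm, PySem.Set.add_of_mem hm]
        simp [hm]
      · have hm2 : u ∈ PySem.Set.add out u := (PySem.Set.mem_add _ _ _).2 (Or.inr rfl)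
        rw [PySem.Set.add_of_mem hm2, PySem.Set.add_of_not_mem hm]
        simp [hm]
    · rw [if_neg (show ¬ t.2.1 = t.1 by rw [← h2]; exact h1), ← h2, ← h]
      have hb1 : (t.1 == u) = false := by
        rw [beq_eq_false_iff_ne]; exact fun hh => h1 hh.symm
      by_cases hm : t.1 ∈ out
      · rw [PySem.Set.add_of_mem hm]
        simp [hb1, hm]
      · rw [PySem.Set.add_of_not_mem hm]
        simp [hb1, hm]
  · rw [if_neg h2]
    by_cases h1 : u = t.1
    · rw [if_pos h1, ← h1, ← h]
      have hb2 : ¬ t.2.1 = u := fun hh => h2 hh.symm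
      by_cases hm : t.2.1 ∈ out
      · rw [PySem.Set.add_of_mem hm]
        simp [hb2, hm]
      · rw [PySem.Set.add_of_not_mem hm]
        simp [hm]
    · rw [if_neg h1, ← h]
      have hb1 : (t.1 == u) = false := by
        rw [beq_eq_false_iff_ne]; exact fun hh => h1 hh.symm
      have hb2 : (t.2.1 == u) = false := by
        rw [beq_eq_false_iff_ne]; exact fun hh => h2 hh.symm
      simp [hb1, hb2]

lemma costars_fold (u : Int) : ∀ (data : List (Int × Int × Int))
    (g : PySem.Dict Int (PySem.Set Int)) (out : List Int),
    out = g.getD u PySem.Set.empty →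
    data.foldl
      (fun out t =>
        if t.1 == u && !(out.contains t.2.1) then out ++ [t.2.1]
        else if t.2.1 == u && !(out.contains t.1) then out ++ [t.1]
        else out)
      out
    = (data.foldl
        (fun g t =>
          ((g.modify t.1 PySem.Set.empty (fun s => PySem.Set.add s t.2.1)).modify
            t.2.1 PySem.Set.empty (fun s => PySem.Set.add s t.1)))
        g).getD u PySem.Set.empty := by
  intro data
  induction data with
  | nil => intro g out h; simpa using h
  | cons t rest ih =>
    intro g out h
    rw [List.foldl_cons, List.foldl_cons]
    exact ih _ _ (costars_step u t g out h)

lemma costars_eq (data : List (Int × Int × Int)) (u : Int) :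
    costars data u = (get_actor_graph data).getD u PySem.Set.empty := by
  rw [costars, get_actor_graph]
  exact costars_fold u data PySem.Dict.empty [] rfl

-- the inner `for v in costars(u)` loop is a fold of Set.add over the seen-filtered stream
lemma inner_fold (seen : PySem.Set Int) (l : List Int) : ∀ acc : List Int,
    l.foldl
      (fun nxt v =>
        if !(PySem.Set.contains seen v) && !(nxt.contains v) then nxt ++ [v] else nxt)
      acc
    = (l.filter (fun v => !(PySem.Set.contains seen v))).foldl PySem.Set.add acc := by
  induction l with
  | nil => intro acc; rfl
  | cons v r ih =>
    intro acc
    by_cases hs : v ∈ seen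
    · have hsc : PySem.Set.contains seen v = true := (PySem.Set.contains_iff _ _).2 hs
      rw [List.foldl_cons, List.filter_cons_of_neg (by simp [hs]), if_neg (by simp [hs])]
      exact ih acc
    · have hsc : PySem.Set.contains seen v = false := by
        rw [Bool.eq_false_iff]
        exact fun hh => hs ((PySem.Set.contains_iff _ _).1 hh)
      have hstep : (if !(PySem.Set.contains seen v) && !(acc.contains v)
            then acc ++ [v] else acc) = PySem.Set.add acc v := by
        rw [PySem.Set.add_eq_ite]
        by_cases hc : v ∈ acc
        · rw [if_neg (by simp [hc]), if_pos hc]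
        · rw [if_pos (by simp; exact ⟨hs, hc⟩), if_neg hc]
      rw [List.foldl_cons, List.filter_cons_of_pos (by simp [hs]), List.foldl_cons, hstep,
        ih (PySem.Set.add acc v)]

lemma ofList_filter_comm (p : Int → Bool) : ∀ l : List Int,
    PySem.Set.ofList (l.filter p) = (PySem.Set.ofList l).filter p := by
  intro l
  induction l with
  | nil => rfl
  | cons x xs ih =>
    rw [PySem.Set.ofList_cons]
    by_cases hx : p x
    · rw [List.filter_cons_of_pos hx, PySem.Set.ofList_cons, ih,
        List.filter_cons_of_pos hx, PySem.Set.discard, PySem.Set.discard,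
        List.filter_filter, List.filter_filter]
      congr 1
      refine List.filter_congr ?_
      intro a _
      exact Bool.and_comm _ _
    · have hx' : p x = false := Bool.eq_false_iff.2 hx
      rw [List.filter_cons_of_neg (by simp [hx']), ih, List.filter_cons_of_neg (by simp [hx']),
        PySem.Set.discard, List.filter_filter]
      refine (List.filter_congr ?_).symm
      intro a _
      by_cases hpa : p a
      · have : (a == x) = false := by
          rw [beq_eq_false_iff_ne]
          intro hax
          rw [hax, hx'] at hpa
          exact Bool.false_ne_true hpa
        simp [this, hpa]
      · have hpa' : p a = false := Bool.eq_false_iff.2 hpa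
        simp [hpa']

-- B's whole round equals A's `result -= closed'` value (both are the dedup'd, seen-filtered
-- neighbour stream of the frontier, frontier-major, first occurrences)
lemma bRound_eq (data : List (Int × Int × Int)) (seen : PySem.Set Int) (frontier : List Int) :
    frontier.foldl
      (fun nxt u =>
        (costars data u).foldl
          (fun nxt v =>
            if !(PySem.Set.contains seen v) && !(nxt.contains v) then nxt ++ [v] else nxt)
          nxt)
      []
    = (PySem.Set.ofList
        (frontier.flatMap (fun u => (get_actor_graph data).getD u PySem.Set.empty))).filter
        (fun v => !(PySem.Set.contains seen v)) := by
  have h1 : (fun (nxt : List Int) (u : Int) =>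
      (costars data u).foldl
        (fun nxt v =>
          if !(PySem.Set.contains seen v) && !(nxt.contains v) then nxt ++ [v] else nxt)
        nxt)
      = fun nxt u =>
        ((costars data u).filter (fun v => !(PySem.Set.contains seen v))).foldl
          PySem.Set.add nxt := by
    funext nxt u
    exact inner_fold seen (costars data u) nxt
  rw [h1, ← List.foldl_flatMap]
  have h2 : frontier.flatMap
      (fun u => (costars data u).filter (fun v => !(PySem.Set.contains seen v)))
      = (frontier.flatMap (fun u => (get_actor_graph data).getD u PySem.Set.empty)).filter
          (fun v => !(PySem.Set.contains seen v)) := by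
    rw [List.filter_flatMap]
    refine List.flatMap_congr ?_
    intro u _
    rw [costars_eq]
  rw [h2, ← PySem.Set.ofList_eq_foldl, ofList_filter_comm]

lemma updfold (g : Int → PySem.Set Int) (l : List Int) : ∀ s : PySem.Set Int,
    l.foldl (fun r i => PySem.Set.union r (g i)) s = PySem.Set.update s (l.flatMap g) := by
  induction l with
  | nil => intro s; simp [PySem.Set.update]
  | cons x r ih =>
    intro s
    rw [List.foldl_cons, ih, List.flatMap_cons, PySem.Set.update_append]
    rfl

-- A's loop body computes exactly the round value against closed' = closed ∪ result
lemma stepA (graph : PySem.Dict Int (PySem.Set Int)) (res closed : PySem.Set Int) :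
    PySem.Set.diff
      (res.foldl (fun r i => PySem.Set.union r (graph.getD i PySem.Set.empty)) res)
      (PySem.Set.union closed res)
    = (PySem.Set.ofList (res.flatMap (fun i => graph.getD i PySem.Set.empty))).filter
        (fun v => !(PySem.Set.contains (PySem.Set.union closed res) v)) := by
  have h1 : res.foldl (fun r i => PySem.Set.union r (graph.getD i PySem.Set.empty)) res
      = PySem.Set.update res (res.flatMap (fun i => graph.getD i PySem.Set.empty)) :=
    updfold _ res res
  rw [PySem.Set.diff, h1, PySem.Set.update_eq_append_filter, List.filter_append]
  have h2 : res.filter (fun x => !(PySem.Set.contains (PySem.Set.union closed res) x)) = [] := by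
    rw [List.filter_eq_nil_iff]
    intro a ha
    have hc : PySem.Set.contains (PySem.Set.union closed res) a = true :=
      (PySem.Set.contains_iff _ _).2 (by rw [PySem.Set.union, PySem.Set.mem_update]; exact Or.inr ha)
    rw [hc]
    exact fun h => Bool.false_ne_true (by simp at h)
  rw [h2, List.nil_append, List.filter_filter]
  refine List.filter_congr ?_
  intro a _
  by_cases hc : PySem.Set.contains (PySem.Set.union closed res) a = true
  · rw [hc]; rfl
  · have hcf : PySem.Set.contains (PySem.Set.union closed res) a = false :=
      Bool.eq_false_iff.2 hc
    have hres : PySem.Set.contains res a = false := by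
      rw [Bool.eq_false_iff]
      intro h'
      have hmem : a ∈ res := (PySem.Set.contains_iff _ _).1 h'
      exact hc ((PySem.Set.contains_iff _ _).2
        (by rw [PySem.Set.union, PySem.Set.mem_update]; exact Or.inr hmem))
    rw [hcf, hres]; rfl

lemma expand_nil (data : List (Int × Int × Int)) (seen : PySem.Set Int) :
    ∀ k, expandLoop data k [] seen = [] := by
  intro k
  cases k with
  | zero => rfl
  | succ k => rfl

lemma main_lem (data : List (Int × Int × Int)) :
    ∀ (k : Nat) (frontier closed : PySem.Set Int), frontier.Nodup →
      baconLoop (get_actor_graph data) k frontier closed = expandLoop data k frontier closed := by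
  intro k
  induction k with
  | zero =>
    intro frontier closed hnd
    show frontier = PySem.Set.ofList frontier
    exact (PySem.Set.ofList_eq_self_of_nodup frontier hnd).symm
  | succ k ih =>
    intro frontier closed hnd
    have hofl : PySem.Set.ofList frontier = frontier :=
      PySem.Set.ofList_eq_self_of_nodup frontier hnd
    by_cases hfe : frontier.isEmpty
    · have hnil : frontier = [] := List.isEmpty_iff.1 hfe
      subst hnil
      simp [baconLoop, expandLoop, PySem.Set.diff]
    · have hfe' : frontier.isEmpty = false := Bool.eq_false_iff.2 hfe
      simp only [baconLoop, expandLoop, hfe', Bool.false_eq_true, if_false]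
      rw [hofl, bRound_eq data (PySem.Set.union closed frontier) frontier,
        stepA (get_actor_graph data) frontier closed]
      set res'' := (PySem.Set.ofList
          (frontier.flatMap (fun u => (get_actor_graph data).getD u PySem.Set.empty))).filter
          (fun v => !(PySem.Set.contains (PySem.Set.union closed frontier) v)) with hres''
      by_cases hre : res''.isEmpty
      · rw [if_pos hre, List.isEmpty_iff.1 hre, expand_nil]
      · rw [if_neg hre]
        exact ih res'' (PySem.Set.union closed frontier)
          ((PySem.Set.nodup_ofList _).filter _)

-- ===== VERDICT =====

theorem get_actors_with_bacon_number_spec : Claim_equal_get_actors_with_bacon_number := by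
  intro data n _ _
  show get_actors_with_bacon_number data n = get_actors_with_bacon_number_alt data n
  rw [get_actors_with_bacon_number, get_actors_with_bacon_number_alt]
  exact main_lem data n.toNat (PySem.Set.ofList [(4724 : Int)]) PySem.Set.empty (by decide)
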